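-- pv_equiv track=rewrite | github.com/1051727403/SHU-CS-Source-Share | 学习资料（非电子书）/Python计算/caiyu/workspace/experiment3/work/ex1-2.py | remove_redundant_dict
-- ===== SOURCE A (Python) =====
-- def remove_redundant_dict(raw_dic):
--     # 设置已出现过值的set集合
--     appeared_set = set()
--     processed_dic = dict()
--     # 遍历字典的键值对
--     for k, v in raw_dic.items():
--         if v not in appeared_set:
--             appeared_set.add(v)
--         else:
--             processed_dic[k] = v
--     return processed_dic
-- ===== SOURCE B (Python) =====
-- def remove_redundant_dict(raw_dic):
--     # pass 1: index each distinct value by the first key that carries it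
--     first_key = {}
--     for k, v in raw_dic.items():
--         if v not in first_key:
--             first_key[v] = k
--     # pass 2: keep every entry except its value's first occurrence
--     return {k: v for k, v in raw_dic.items() if first_key[v] != k}
-- ===== Notes on version B (the rewrite author's own statement) =====
-- stated objective: alternative
-- what changed: Replaced the single interleaved seen-set loop with two passes: first build a value->first-key index, then filter raw_dic.items() keeping exactly the entries whose value's first key is a different key.
import Mathlib
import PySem

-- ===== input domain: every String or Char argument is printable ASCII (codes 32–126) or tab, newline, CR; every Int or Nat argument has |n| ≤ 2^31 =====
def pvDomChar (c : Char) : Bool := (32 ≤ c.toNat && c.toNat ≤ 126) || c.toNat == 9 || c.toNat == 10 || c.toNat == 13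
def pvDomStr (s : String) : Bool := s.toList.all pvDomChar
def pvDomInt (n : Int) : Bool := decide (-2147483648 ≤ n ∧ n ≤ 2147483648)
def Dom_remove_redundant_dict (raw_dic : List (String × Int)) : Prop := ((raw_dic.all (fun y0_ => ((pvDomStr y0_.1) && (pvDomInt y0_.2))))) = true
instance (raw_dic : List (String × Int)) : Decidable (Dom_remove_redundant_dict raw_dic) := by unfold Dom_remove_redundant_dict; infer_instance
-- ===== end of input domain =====

-- B replaces A's interleaved seen-set loop by two passes (value→first-key index, then a filter);
-- objective: alternative decomposition, same cost.


-- ===== PORT A =====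
-- loop body of A: 'if v not in appeared_set: appeared_set.add(v) else: processed_dic[k] = v'
def pvStepA (st : PySem.Set Int × PySem.Dict String Int) (kv : String × Int) :
    PySem.Set Int × PySem.Dict String Int :=
  if PySem.Set.contains st.1 kv.2 = false then
    (PySem.Set.add st.1 kv.2, st.2)
  else
    (st.1, st.2.insert kv.1 kv.2)

def remove_redundant_dict (raw_dic : List (String × Int)) : List (String × Int) :=
  ((raw_dic.foldl pvStepA ((PySem.Set.empty : PySem.Set Int), (PySem.Dict.empty : PySem.Dict String Int))).2).items

-- ===== PORT B =====
-- pass 1 of B: 'if v not in first_key: first_key[v] = k'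
def pvFirstKey (raw_dic : List (String × Int)) : PySem.Dict Int String :=
  raw_dic.foldl
    (fun m kv => if m.contains kv.2 = false then m.insert kv.2 kv.1 else m)
    PySem.Dict.empty

-- pass 2 of B: dict-comprehension filter 'first_key[v] != k'. first_key[v] is always present
-- for v drawn from raw_dic, so 'get? kv.2 ≠ some kv.1' is exactly Python's first_key[v] != k.
def pvStepB (fk : PySem.Dict Int String) (d : PySem.Dict String Int) (kv : String × Int) :
    PySem.Dict String Int :=
  if fk.get? kv.2 ≠ some kv.1 then d.insert kv.1 kv.2 else d

def remove_redundant_dict_alt (raw_dic : List (String × Int)) : List (String × Int) :=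
  (raw_dic.foldl (pvStepB (pvFirstKey raw_dic)) (PySem.Dict.empty : PySem.Dict String Int)).items

-- ===== PRECONDITION & SPEC =====
-- Pre_ requires pairwise-distinct keys: an association list with duplicate keys does not
-- represent a Python dict (the real A receives a dict, in which later duplicates overwrite).
def Pre_remove_redundant_dict (raw_dic : List (String × Int)) : Prop :=
  (raw_dic.map Prod.fst).Nodup
instance (raw_dic : List (String × Int)) : Decidable (Pre_remove_redundant_dict raw_dic) := by
  unfold Pre_remove_redundant_dict; infer_instance

def pvWitness_remove_redundant_dict : (List (String × Int)) := [("a", 1), ("b", 1), ("c", 2)]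

def Spec_remove_redundant_dict (raw_dic : List (String × Int)) (out : List (String × Int)) : Prop := out = remove_redundant_dict_alt raw_dic
instance (raw_dic : List (String × Int)) (out : List (String × Int)) : Decidable (Spec_remove_redundant_dict raw_dic out) := by unfold Spec_remove_redundant_dict; infer_instance

-- ===== CLAIM (what is proved, stated in full; the proofs are below) =====
def Claim_equal_remove_redundant_dict : Prop := ∀ (raw_dic : List (String × Int)), Dom_remove_redundant_dict raw_dic → Pre_remove_redundant_dict raw_dic → Spec_remove_redundant_dict raw_dic (remove_redundant_dict raw_dic)

-- ===== LEMMAS AND PROOFS =====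

-- pass 1 builds the value→first-key index: its lookup is the first matching pair of the list
theorem pvFirstKey_get (l : List (String × Int)) (m : PySem.Dict Int String) (v : Int) :
    (l.foldl (fun m kv => if m.contains kv.2 = false then m.insert kv.2 kv.1 else m) m).get? v
      = (m.get? v).or ((l.find? (fun kv => kv.2 == v)).map Prod.fst) := by
  induction l generalizing m with
  | nil => simp
  | cons kv t ih =>
    obtain ⟨k, w⟩ := kv
    simp only [List.foldl_cons, List.find?_cons]
    by_cases hc : m.contains w = false
    · rw [if_pos hc, ih]
      by_cases hvw : v = w
      · subst hvw
        have hnone : m.get? v = none := by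
          rw [PySem.Dict.get?_eq_none_iff_contains]; exact hc
        simp [hnone]
      · have hb : (w == v) = false := beq_eq_false_iff_ne.mpr (Ne.symm hvw)
        simp [PySem.Dict.get?_insert, hvw, hb]
    · rw [if_neg hc, ih]
      by_cases hvw : v = w
      · subst hvw
        have hsome : ∃ u, m.get? v = some u := by
          have h2 := PySem.Dict.contains_eq_isSome_get? (d := m) (k := v)
          rcases h : m.get? v with _ | u
          · rw [h, Option.isSome_none] at h2; exact absurd h2 (by simpa using hc)
          · exact ⟨u, rfl⟩
        obtain ⟨u, hu⟩ := hsome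
        simp [hu]
      · have hb : (w == v) = false := beq_eq_false_iff_ne.mpr (Ne.symm hvw)
        simp [hb]

theorem pv_main (l : List (String × Int))
    (hnd : (l.map Prod.fst).Nodup) :
    ∀ (t p : List (String × Int)) (s : PySem.Set Int) (d : PySem.Dict String Int),
      l = p ++ t →
      (∀ w : Int, w ∈ s ↔ w ∈ p.map Prod.snd) →
      (t.foldl pvStepA (s, d)).2 = t.foldl (pvStepB (pvFirstKey l)) d := by
  intro t
  induction t with
  | nil => intro p s d _ _; rfl
  | cons kv t ih =>
    intro p s d hl hs
    obtain ⟨k, v⟩ := kv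
    have hfk : (pvFirstKey l).get? v = ((l.find? (fun kv => kv.2 == v)).map Prod.fst) := by
      have := pvFirstKey_get l PySem.Dict.empty v
      simpa [pvFirstKey] using this
    have hfind : (l.find? (fun kv => kv.2 == v))
        = ((p.find? (fun kv => kv.2 == v)).or (((k, v) :: t).find? (fun kv => kv.2 == v))) := by
      rw [hl, List.find?_append]
    -- key not among the prefix keys
    have hknotp : k ∉ p.map Prod.fst := by
      have := hnd
      rw [hl] at this
      simp only [List.map_append, List.nodup_append] at this
      intro hk
      exact this.2.2 k hk k (by simp) rfl
    by_cases hv : v ∈ p.map Prod.snd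
    · -- value already appeared: A inserts into the dict; B's filter keeps the entry
      have hvs : v ∈ s := (hs v).mpr hv
      have hne : (pvFirstKey l).get? v ≠ some k := by
        -- the first key carrying v lies in the prefix, hence differs from k
        have hexists : ∃ x ∈ p, (fun kv : String × Int => kv.2 == v) x := by
          obtain ⟨⟨k0, v0⟩, hmem, hv0⟩ := List.mem_map.mp hv
          exact ⟨(k0, v0), hmem, by simp_all⟩
        have hisSome : (p.find? (fun kv => kv.2 == v)).isSome := by
          rw [List.find?_isSome]; exact hexists
        rcases hfound : p.find? (fun kv => kv.2 == v) with _ | ⟨k0, v0⟩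
        · rw [hfound] at hisSome; simp at hisSome
        · have hmem0 : (k0, v0) ∈ p := List.mem_of_find?_eq_some hfound
          have hk0 : k0 ∈ p.map Prod.fst := List.mem_map.mpr ⟨(k0, v0), hmem0, rfl⟩
          have hk0ne : k0 ≠ k := fun h => hknotp (h ▸ hk0)
          rw [hfk, hfind, hfound]
          simp [hk0ne]
      show ((t.foldl pvStepA (pvStepA (s, d) (k, v))).2)
          = t.foldl (pvStepB (pvFirstKey l)) (pvStepB (pvFirstKey l) d (k, v))
      rw [show pvStepA (s, d) (k, v) = (s, d.insert k v) by
            simp [pvStepA, hvs],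
          show pvStepB (pvFirstKey l) d (k, v) = d.insert k v by
            simp [pvStepB, hne]]
      refine ih (p ++ [(k, v)]) s (d.insert k v) (by simp [hl]) ?_
      intro w
      rw [hs w]
      simp only [List.map_append, List.mem_append, List.map_cons, List.map_nil,
        List.mem_singleton]
      constructor
      · exact fun h => Or.inl h
      · rintro (h | h)
        · exact h
        · simpa [h] using hv
    · -- first occurrence of the value: A only records it; B's filter drops the entry
      have hvs : v ∉ s := fun h => hv ((hs v).mp h)
      have heq : (pvFirstKey l).get? v = some k := by
        have hpnone : p.find? (fun kv => kv.2 == v) = none := by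
          rw [List.find?_eq_none]
          rintro ⟨k0, v0⟩ hmem h
          exact hv (List.mem_map.mpr ⟨(k0, v0), hmem, by simpa using h⟩)
        rw [hfk, hfind, hpnone]
        simp
      show ((t.foldl pvStepA (pvStepA (s, d) (k, v))).2)
          = t.foldl (pvStepB (pvFirstKey l)) (pvStepB (pvFirstKey l) d (k, v))
      rw [show pvStepA (s, d) (k, v) = (PySem.Set.add s v, d) by
            simp [pvStepA, hvs],
          show pvStepB (pvFirstKey l) d (k, v) = d by
            simp [pvStepB, heq]]
      refine ih (p ++ [(k, v)]) (PySem.Set.add s v) d (by simp [hl]) ?_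
      intro w
      rw [PySem.Set.mem_add, hs w]
      simp [or_comm]

-- ===== VERDICT (by name: the statement is the Claim_ definition above) =====
theorem remove_redundant_dict_spec : Claim_equal_remove_redundant_dict := by
  intro raw_dic _ hpre
  unfold Spec_remove_redundant_dict remove_redundant_dict remove_redundant_dict_alt
  have := pv_main raw_dic hpre raw_dic [] PySem.Set.empty PySem.Dict.empty (by simp) (by simp [PySem.Set.empty])
  rw [this]
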